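-- pv_equiv track=rewrite | github.com/Agnimandur/USACO | USACO Training/Wormhole/wormhole.py | generateRight
-- ===== SOURCE A (Python) =====
-- def generateRight(Xpoints,Ypoints):
--     nextOnRight = {}
--     for i in range(0,len(Xpoints)):
--         nextOnRight[i+1] = 0
--     for i in range(0,len(Xpoints)):
--         for j in range(0,len(Xpoints)):
--             if Ypoints[i] == Ypoints[j] and Xpoints[i] < Xpoints[j]:
--                 if nextOnRight[i+1] != 0:
--                     XofNOR = Xpoints[nextOnRight[i+1] - 1]
--                     if XofNOR > Xpoints[j]:
--                         nextOnRight[i+1] = j+1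
--                 else:
--                     nextOnRight[i+1] = j+1
--     return nextOnRight
-- ===== SOURCE B (Python) =====
-- def generateRight(Xpoints, Ypoints):
--     n = len(Xpoints)
--     groups = {}
--     for i in range(n):
--         groups.setdefault(Ypoints[i], []).append(i)
--     nextOnRight = {}
--     for i in range(n):
--         cand = [j for j in groups[Ypoints[i]] if Xpoints[j] > Xpoints[i]]
--         best = min(cand, key=lambda j: Xpoints[j], default=None)
--         nextOnRight[i + 1] = 0 if best is None else best + 1
--     return nextOnRight
-- ===== Notes on version B (the rewrite author's own statement) =====
-- stated objective: alternative
-- what changed: B builds a dict grouping indices by their Y value once and takes the minimum-X candidate inside the point's own row group, instead of A's nested all-pairs scan with a running-best update.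
import Mathlib
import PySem

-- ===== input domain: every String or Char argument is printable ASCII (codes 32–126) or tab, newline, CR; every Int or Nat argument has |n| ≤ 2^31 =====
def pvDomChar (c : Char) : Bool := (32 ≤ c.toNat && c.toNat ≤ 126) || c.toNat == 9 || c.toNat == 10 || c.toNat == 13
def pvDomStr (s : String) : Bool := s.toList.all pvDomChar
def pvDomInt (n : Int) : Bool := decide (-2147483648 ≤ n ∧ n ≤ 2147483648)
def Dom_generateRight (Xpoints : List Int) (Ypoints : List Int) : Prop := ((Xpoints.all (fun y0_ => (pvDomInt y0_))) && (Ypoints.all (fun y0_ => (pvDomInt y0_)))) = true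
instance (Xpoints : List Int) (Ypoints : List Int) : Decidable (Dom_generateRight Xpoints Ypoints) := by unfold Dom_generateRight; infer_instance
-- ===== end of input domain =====

-- B replaces A's nested all-pairs scan by grouping indices by their Y value in a dict once and
-- taking the min-X candidate within each point's own row group (objective: alternative algorithm).

-- ===== PORT A =====
def generateRight (Xpoints : List Int) (Ypoints : List Int) : List (Int × Int) :=
  let nextOnRight : PySem.Dict Int Int :=
    (PySem.List.pyRange 0 (Xpoints.length : Int) 1).foldl
      (fun d i => d.insert (i + 1) 0) PySem.Dict.empty
  let nextOnRight :=
    (PySem.List.pyRange 0 (Xpoints.length : Int) 1).foldl (fun d i =>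
      (PySem.List.pyRange 0 (Xpoints.length : Int) 1).foldl (fun d j =>
        if PySem.List.pyGetD Ypoints i 0 = PySem.List.pyGetD Ypoints j 0 ∧
           PySem.List.pyGetD Xpoints i 0 < PySem.List.pyGetD Xpoints j 0 then
          if d.getD (i + 1) 0 ≠ 0 then
            -- XofNOR = Xpoints[nextOnRight[i+1] - 1] (the index is always in range: stored values are j+1)
            if PySem.List.pyGetD Xpoints (d.getD (i + 1) 0 - 1) 0 > PySem.List.pyGetD Xpoints j 0 then
              d.insert (i + 1) (j + 1)
            else d
          else d.insert (i + 1) (j + 1)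
        else d) d) nextOnRight
  nextOnRight.items

-- ===== PORT B =====
def generateRight_alt (Xpoints : List Int) (Ypoints : List Int) : List (Int × Int) :=
  let groups : PySem.Dict Int (List Int) :=
    (PySem.List.pyRange 0 (Xpoints.length : Int) 1).foldl
      (fun d i => d.modify (PySem.List.pyGetD Ypoints i 0) [] (· ++ [i])) PySem.Dict.empty
  let nextOnRight : PySem.Dict Int Int :=
    (PySem.List.pyRange 0 (Xpoints.length : Int) 1).foldl (fun d i =>
      -- groups[Ypoints[i]]: the key is always present (i itself is in its group), so getD is exact
      let cand := (groups.getD (PySem.List.pyGetD Ypoints i 0) []).filter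
        (fun j => decide (PySem.List.pyGetD Xpoints i 0 < PySem.List.pyGetD Xpoints j 0))
      d.insert (i + 1)
        (match PySem.List.min? cand (fun j => PySem.List.pyGetD Xpoints j 0) with
          | none => 0
          | some m => m + 1)) PySem.Dict.empty
  nextOnRight.items

-- ===== PRECONDITION & SPEC =====
-- Pre_: Python A evaluates Ypoints[i] for every i < len(Xpoints), so it raises IndexError
-- exactly when Ypoints is shorter than Xpoints; those inputs are excluded.
def Pre_generateRight (Xpoints : List Int) (Ypoints : List Int) : Prop :=
  Xpoints.length ≤ Ypoints.length
instance (Xpoints : List Int) (Ypoints : List Int) : Decidable (Pre_generateRight Xpoints Ypoints) := by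
  unfold Pre_generateRight; infer_instance
def pvWitness_generateRight : List Int × List Int := ([1, 5, 3], [0, 0, 0])

def Spec_generateRight (Xpoints : List Int) (Ypoints : List Int) (out : List (Int × Int)) : Prop := out = generateRight_alt Xpoints Ypoints
instance (Xpoints : List Int) (Ypoints : List Int) (out : List (Int × Int)) : Decidable (Spec_generateRight Xpoints Ypoints out) := by unfold Spec_generateRight; infer_instance

-- ===== CLAIM (what is proved, stated in full; the proofs are below) =====
def Claim_equal_generateRight : Prop := ∀ (Xpoints : List Int) (Ypoints : List Int), Dom_generateRight Xpoints Ypoints → Pre_generateRight Xpoints Ypoints → Spec_generateRight Xpoints Ypoints (generateRight Xpoints Ypoints)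

-- ===== LEMMAS AND PROOFS =====

-- A's running-best update on one candidate j, with the current best encoded as an Int (0 = none, m+1 = some m)
def pvStepA (X : List Int) (v j : Int) : Int :=
  if v ≠ 0 then
    if PySem.List.pyGetD X (v - 1) 0 > PySem.List.pyGetD X j 0 then j + 1 else v
  else j + 1

-- the same update on the Option side: exactly one foldl step of PySem.List.min?
def pvStepM (X : List Int) (o : Option Int) (j : Int) : Option Int :=
  match o with
  | none => some j
  | some m => if PySem.List.pyGetD X j 0 < PySem.List.pyGetD X m 0 then some j else some m

def pvEnc : Option Int → Int
  | none => 0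
  | some m => m + 1

theorem pvStepA_enc (X : List Int) (o : Option Int) (j : Int)
    (ho : ∀ m, o = some m → 0 ≤ m) :
    pvStepA X (pvEnc o) j = pvEnc (pvStepM X o j) := by
  cases o with
  | none => simp [pvStepA, pvStepM, pvEnc]
  | some m =>
    have hm : 0 ≤ m := ho m rfl
    have h1 : m + 1 ≠ 0 := by omega
    simp only [pvStepA, pvStepM, pvEnc, add_sub_cancel_right, gt_iff_lt, if_pos h1]
    split_ifs <;> rfl

theorem pvFoldA_enc (X : List Int) (cand : List Int) (o : Option Int)
    (ho : ∀ m, o = some m → 0 ≤ m) (hc : ∀ j ∈ cand, 0 ≤ j) :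
    cand.foldl (pvStepA X) (pvEnc o) = pvEnc (cand.foldl (pvStepM X) o) := by
  induction cand generalizing o with
  | nil => rfl
  | cons j t ih =>
    simp only [List.foldl_cons]
    rw [pvStepA_enc X o j ho]
    refine ih _ ?_ (fun a ha => hc a (List.mem_cons_of_mem _ ha))
    intro m hm
    have hj : 0 ≤ j := hc j (List.mem_cons_self)
    cases o with
    | none => simp [pvStepM] at hm; omega
    | some m0 =>
      have := ho m0 rfl
      simp only [pvStepM] at hm
      split_ifs at hm <;> simp_all

theorem pvMin?_eq_foldl (X : List Int) (cand : List Int) :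
    PySem.List.min? cand (fun j => PySem.List.pyGetD X j 0) = cand.foldl (pvStepM X) none := by
  simp only [PySem.List.min?]
  apply PySem.List.foldl_congr_mem
  intro acc x _
  cases acc <;> rfl

theorem pvInsert_getD_self (d : PySem.Dict Int Int) (k : Int)
    (hk : d.contains k = true) (hn : d.keys.Nodup) :
    d.insert k (d.getD k 0) = d := by
  apply PySem.Dict.ext
  rw [PySem.Dict.items_insert_of_contains d _ hk]
  conv_rhs => rw [← List.map_id d.items]
  refine List.map_congr_left fun p hp => ?_
  by_cases h : p.1 = k
  · subst h
    simp only [BEq.rfl, if_true, id]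
    have := PySem.Dict.getD_of_mem_items (d := d) (k := p.1) (v := p.2) (d0 := 0) hp hn
    rw [this]
  · simp [h]

-- A's inner loop over js only touches key i+1: it is a single insert of the scalar fold's result
theorem pvInner_eq_insert (X Y : List Int) (i : Int) (js : List Int) (d : PySem.Dict Int Int)
    (hk : d.contains (i + 1) = true) (hn : d.keys.Nodup) :
    js.foldl (fun d j =>
        if PySem.List.pyGetD Y i 0 = PySem.List.pyGetD Y j 0 ∧
           PySem.List.pyGetD X i 0 < PySem.List.pyGetD X j 0 then
          if d.getD (i + 1) 0 ≠ 0 then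
            if PySem.List.pyGetD X (d.getD (i + 1) 0 - 1) 0 > PySem.List.pyGetD X j 0 then
              d.insert (i + 1) (j + 1)
            else d
          else d.insert (i + 1) (j + 1)
        else d) d
    = d.insert (i + 1)
        (js.foldl (fun v j =>
          if PySem.List.pyGetD Y i 0 = PySem.List.pyGetD Y j 0 ∧
             PySem.List.pyGetD X i 0 < PySem.List.pyGetD X j 0 then pvStepA X v j else v)
          (d.getD (i + 1) 0)) := by
  induction js generalizing d with
  | nil => exact (pvInsert_getD_self d (i+1) hk hn).symm
  | cons j t ih =>
    simp only [List.foldl_cons]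
    by_cases hP : PySem.List.pyGetD Y i 0 = PySem.List.pyGetD Y j 0 ∧
        PySem.List.pyGetD X i 0 < PySem.List.pyGetD X j 0
    · rw [if_pos hP, if_pos hP]
      have hstep : ∀ w : Int,
          t.foldl (fun d j =>
            if PySem.List.pyGetD Y i 0 = PySem.List.pyGetD Y j 0 ∧
               PySem.List.pyGetD X i 0 < PySem.List.pyGetD X j 0 then
              if d.getD (i + 1) 0 ≠ 0 then
                if PySem.List.pyGetD X (d.getD (i + 1) 0 - 1) 0 > PySem.List.pyGetD X j 0 then
                  d.insert (i + 1) (j + 1)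
                else d
              else d.insert (i + 1) (j + 1)
            else d) (d.insert (i + 1) w)
          = d.insert (i + 1)
              (t.foldl (fun v j =>
                if PySem.List.pyGetD Y i 0 = PySem.List.pyGetD Y j 0 ∧
                   PySem.List.pyGetD X i 0 < PySem.List.pyGetD X j 0 then pvStepA X v j else v) w) := by
        intro w
        rw [ih (d.insert (i + 1) w) (PySem.Dict.contains_insert_self d _ _)
            (by rw [PySem.Dict.keys_insert_of_contains d _ hk]; exact hn)]
        rw [PySem.Dict.insert_insert_self, PySem.Dict.getD_insert_self]
      by_cases h0 : d.getD (i + 1) 0 ≠ 0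
      · by_cases hcmp : PySem.List.pyGetD X (d.getD (i + 1) 0 - 1) 0 > PySem.List.pyGetD X j 0
        · rw [if_pos h0, if_pos hcmp,
              show pvStepA X (d.getD (i + 1) 0) j = j + 1 from by simp [pvStepA, h0, hcmp],
              hstep]
        · rw [if_pos h0, if_neg hcmp,
              show pvStepA X (d.getD (i + 1) 0) j = d.getD (i + 1) 0 from by simp [pvStepA, h0, hcmp],
              ih d hk hn]
      · rw [if_neg h0,
            show pvStepA X (d.getD (i + 1) 0) j = j + 1 from by simp [pvStepA, h0],
            hstep]
    · rw [if_neg hP, if_neg hP, ih d hk hn]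

theorem pvGroups_getD (X Y : List Int) (c : Int) :
    ((PySem.List.pyRange 0 (X.length : Int) 1).foldl
        (fun d i => d.modify (PySem.List.pyGetD Y i 0) [] (· ++ [i]))
        (PySem.Dict.empty : PySem.Dict Int (List Int))).getD c []
    = (PySem.List.pyRange 0 (X.length : Int) 1).filter
        (fun j => PySem.List.pyGetD Y j 0 == c) := by
  have h1 : (PySem.List.pyRange 0 (X.length : Int) 1).foldl
      (fun d i => d.modify (PySem.List.pyGetD Y i 0) [] (· ++ [i]))
      (PySem.Dict.empty : PySem.Dict Int (List Int))
      = ((PySem.List.pyRange 0 (X.length : Int) 1).map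
          (fun i => (PySem.List.pyGetD Y i 0, i))).foldl
        (fun d p => d.modify p.1 [] (· ++ [p.2])) PySem.Dict.empty := by
    rw [List.foldl_map]
  rw [h1, PySem.Dict.getD_foldl_modify_append, PySem.Dict.getD_empty, List.filter_map,
    List.map_map]
  simp [Function.comp_def]

-- the scalar value A ends up storing for index i
def pvGA (X Y : List Int) (i : Int) : Int :=
  (PySem.List.pyRange 0 (X.length : Int) 1).foldl (fun v j =>
    if PySem.List.pyGetD Y i 0 = PySem.List.pyGetD Y j 0 ∧
       PySem.List.pyGetD X i 0 < PySem.List.pyGetD X j 0 then pvStepA X v j else v) 0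

-- the value B stores for index i
def pvVB (X Y : List Int) (i : Int) : Int :=
  pvEnc (PySem.List.min?
    (((PySem.List.pyRange 0 (X.length : Int) 1).filter
        (fun j => PySem.List.pyGetD Y j 0 == PySem.List.pyGetD Y i 0)).filter
      (fun j => decide (PySem.List.pyGetD X i 0 < PySem.List.pyGetD X j 0)))
    (fun j => PySem.List.pyGetD X j 0))

theorem pvGA_eq_pvVB (X Y : List Int) (i : Int) : pvGA X Y i = pvVB X Y i := by
  unfold pvGA pvVB
  rw [PySem.List.foldl_ite_eq_foldl_filter
      (p := fun j => PySem.List.pyGetD Y i 0 = PySem.List.pyGetD Y j 0 ∧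
        PySem.List.pyGetD X i 0 < PySem.List.pyGetD X j 0) (f := pvStepA X)]
  have hcand : (PySem.List.pyRange 0 (X.length : Int) 1).filter
      (fun j => decide (PySem.List.pyGetD Y i 0 = PySem.List.pyGetD Y j 0 ∧
        PySem.List.pyGetD X i 0 < PySem.List.pyGetD X j 0))
      = ((PySem.List.pyRange 0 (X.length : Int) 1).filter
          (fun j => PySem.List.pyGetD Y j 0 == PySem.List.pyGetD Y i 0)).filter
        (fun j => decide (PySem.List.pyGetD X i 0 < PySem.List.pyGetD X j 0)) := by
    rw [List.filter_filter]
    refine List.filter_congr fun j _ => ?_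
    by_cases h1 : PySem.List.pyGetD Y i 0 = PySem.List.pyGetD Y j 0
    · by_cases h2 : PySem.List.pyGetD X i 0 < PySem.List.pyGetD X j 0 <;> simp [h1, h2]
    · have h1' : PySem.List.pyGetD Y j 0 ≠ PySem.List.pyGetD Y i 0 := fun h => h1 h.symm
      simp [h1, h1']
  rw [hcand, pvMin?_eq_foldl]
  refine pvFoldA_enc X _ none (fun m hm => by simp at hm) ?_
  intro j hj
  have hj' := List.mem_filter.mp hj
  have hj'' := List.mem_filter.mp hj'.1
  have := (PySem.List.mem_pyRange_one).mp hj''.1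
  omega

theorem pvB_items (X Y : List Int) :
    generateRight_alt X Y =
      (PySem.List.pyRange 0 (X.length : Int) 1).map (fun i => (i + 1, pvVB X Y i)) := by
  simp only [generateRight_alt]
  rw [PySem.Dict.items_foldl_insert_fresh _ (fun i => i + 1) _ _
      (fun a _ => PySem.Dict.contains_empty _)
      (List.Nodup.map (fun a b h => by omega) (PySem.List.nodup_pyRange_one 0 (X.length : Int)))]
  simp only [show (PySem.Dict.empty : PySem.Dict Int Int).items = [] from rfl, List.nil_append]
  refine List.map_congr_left fun i _ => ?_
  rw [pvGroups_getD]
  unfold pvVB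
  cases PySem.List.min?
      (((PySem.List.pyRange 0 (X.length : Int) 1).filter
          (fun j => PySem.List.pyGetD Y j 0 == PySem.List.pyGetD Y i 0)).filter
        (fun j => decide (PySem.List.pyGetD X i 0 < PySem.List.pyGetD X j 0)))
      (fun j => PySem.List.pyGetD X j 0) <;> rfl

-- A's first loop: the dict {1:0, …, n:0}
theorem pvD0_items (X : List Int) :
    ((PySem.List.pyRange 0 (X.length : Int) 1).foldl
        (fun d i => d.insert (i + 1) 0) (PySem.Dict.empty : PySem.Dict Int Int)).items
      = (PySem.List.pyRange 0 (X.length : Int) 1).map (fun k => (k + 1, 0)) := by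
  rw [PySem.Dict.items_foldl_insert_fresh _ (fun i => i + 1) _ _
      (fun a _ => PySem.Dict.contains_empty _)
      (List.Nodup.map (fun a b h => by omega) (PySem.List.nodup_pyRange_one 0 (X.length : Int)))]
  simp only [show (PySem.Dict.empty : PySem.Dict Int Int).items = [] from rfl, List.nil_append]

-- one outer iteration of A rewrites exactly the entry of key i+1
theorem pvA_step (X Y : List Int) (i : Int) (D : PySem.Dict Int Int) (g : Int → Int)
    (hI : D.items = (PySem.List.pyRange 0 (X.length : Int) 1).map (fun k => (k + 1, g k)))
    (hi : i ∈ PySem.List.pyRange 0 (X.length : Int) 1) (hg : g i = 0) :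
    ((PySem.List.pyRange 0 (X.length : Int) 1).foldl (fun d j =>
        if PySem.List.pyGetD Y i 0 = PySem.List.pyGetD Y j 0 ∧
           PySem.List.pyGetD X i 0 < PySem.List.pyGetD X j 0 then
          if d.getD (i + 1) 0 ≠ 0 then
            if PySem.List.pyGetD X (d.getD (i + 1) 0 - 1) 0 > PySem.List.pyGetD X j 0 then
              d.insert (i + 1) (j + 1)
            else d
          else d.insert (i + 1) (j + 1)
        else d) D).items
    = (PySem.List.pyRange 0 (X.length : Int) 1).map
        (fun k => (k + 1, if k = i then pvGA X Y k else g k)) := by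
  have hkeys : D.keys = (PySem.List.pyRange 0 (X.length : Int) 1).map (fun k => k + 1) := by
    simp only [PySem.Dict.keys, hI, List.map_map]
    rfl
  have hnodup : D.keys.Nodup := by
    rw [hkeys]
    exact List.Nodup.map (fun a b h => by omega) (PySem.List.nodup_pyRange_one 0 (X.length : Int))
  have hcontains : D.contains (i + 1) = true := by
    rw [PySem.Dict.contains_eq_decide_mem_keys, hkeys]
    exact decide_eq_true (List.mem_map_of_mem hi)
  have hpair : (i + 1, g i) ∈ D.items := by
    rw [hI]
    exact List.mem_map_of_mem hi
  have hgetD : D.getD (i + 1) 0 = g i := PySem.Dict.getD_of_mem_items (d := D) (k := i + 1) (v := g i) (d0 := 0) hpair hnodup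
  rw [pvInner_eq_insert X Y i _ D hcontains hnodup, hgetD, hg,
    PySem.Dict.items_insert_of_contains D _ hcontains, hI, List.map_map]
  simp only [pvGA]
  refine List.map_congr_left fun k _ => ?_
  by_cases hki : k = i
  · subst hki
    simp
  · have hne : ((k + 1 : Int) == i + 1) = false := by
      simp only [beq_eq_false_iff_ne, ne_eq]
      omega
    simp [hki]

-- A's outer loop, truncated to its first m iterations
theorem pvA_fold (X Y : List Int) (m : Nat) (hm : m ≤ X.length) :
    ((PySem.List.pyRange 0 (m : Int) 1).foldl (fun d i =>
        (PySem.List.pyRange 0 (X.length : Int) 1).foldl (fun d j =>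
          if PySem.List.pyGetD Y i 0 = PySem.List.pyGetD Y j 0 ∧
             PySem.List.pyGetD X i 0 < PySem.List.pyGetD X j 0 then
            if d.getD (i + 1) 0 ≠ 0 then
              if PySem.List.pyGetD X (d.getD (i + 1) 0 - 1) 0 > PySem.List.pyGetD X j 0 then
                d.insert (i + 1) (j + 1)
              else d
            else d.insert (i + 1) (j + 1)
          else d) d)
      ((PySem.List.pyRange 0 (X.length : Int) 1).foldl
        (fun d i => d.insert (i + 1) 0) PySem.Dict.empty)).items
    = (PySem.List.pyRange 0 (X.length : Int) 1).map
        (fun k => (k + 1, if k < (m : Int) then pvGA X Y k else 0)) := by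
  induction m with
  | zero =>
    rw [show ((0 : Nat) : Int) = 0 from rfl, PySem.List.pyRange_one_eq_nil (le_refl 0),
      List.foldl_nil, pvD0_items]
    refine List.map_congr_left fun k hk => ?_
    have := (PySem.List.mem_pyRange_one).mp hk
    rw [if_neg (by omega)]
  | succ m ih =>
    have hm' : m ≤ X.length := by omega
    have hcast : ((m + 1 : Nat) : Int) = (m : Int) + 1 := by push_cast; ring
    rw [hcast, PySem.List.pyRange_one_succ_right (by positivity), List.foldl_append,
      List.foldl_cons, List.foldl_nil]
    rw [pvA_step X Y (m : Int) _ (fun k => if k < (m : Int) then pvGA X Y k else 0) (ih hm')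
        ((PySem.List.mem_pyRange_one).mpr (by constructor <;> [positivity; exact_mod_cast by omega]))
        (by simp)]
    refine List.map_congr_left fun k hk => ?_
    by_cases hki : k = (m : Int)
    · subst hki
      simp
    · rw [if_neg hki]
      by_cases hlt : k < (m : Int)
      · rw [if_pos hlt, if_pos (by omega)]
      · rw [if_neg hlt, if_neg (by omega)]

theorem pvA_items (X Y : List Int) :
    generateRight X Y =
      (PySem.List.pyRange 0 (X.length : Int) 1).map (fun i => (i + 1, pvGA X Y i)) := by
  simp only [generateRight]
  rw [pvA_fold X Y X.length (le_refl _)]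
  refine List.map_congr_left fun k hk => ?_
  have := (PySem.List.mem_pyRange_one).mp hk
  rw [if_pos (by omega)]

-- ===== VERDICT (by name: the statement is the Claim_ definition above) =====
theorem generateRight_spec : Claim_equal_generateRight := by
  intro X Y _ _
  unfold Spec_generateRight
  rw [pvA_items, pvB_items]
  exact List.map_congr_left fun i _ => by rw [pvGA_eq_pvVB]
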